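-- pv_equiv track=rewrite | github.com/Yuuraa/Python-Algorithm | Leetcode/APR_2021/global_local_inversions.py | is_ideal_permutation_timeout
-- ===== SOURCE A (Python) =====
-- def is_ideal_permutation_timeout(a):
--     prev_val = a[0]
--     global_inversion, local_inversion = 0, 0
--     for val in a[1:]:
--         if val < prev_val: local_inversion += 1
--         prev_val = val
--
--     for i, val in enumerate(a):
--         global_inversion += len([inversed_val for inversed_val in a[i+1:] if inversed_val < val])
--         if global_inversion > local_inversion:
--             return False
--
--     return global_inversion == local_inversion
-- ===== SOURCE B (Python) =====
-- def is_ideal_permutation_timeout(a):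
--     # Global inversions equal local inversions iff no element is smaller than
--     # an element at least two positions before it: track a lagged running max.
--     mx = None
--     for i in range(len(a) - 2):
--         mx = a[i] if mx is None else max(mx, a[i])
--         if a[i + 2] < mx:
--             return False
--     return True
-- ===== Notes on version B (the rewrite author's own statement) =====
-- stated objective: faster
-- what changed: Replaces A's counting of all inversion pairs via repeated suffix scans (comparing the count with the adjacent-inversion count) by a single pass that keeps the running maximum lagged two positions and fails as soon as some element is below it.
import Mathlib
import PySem

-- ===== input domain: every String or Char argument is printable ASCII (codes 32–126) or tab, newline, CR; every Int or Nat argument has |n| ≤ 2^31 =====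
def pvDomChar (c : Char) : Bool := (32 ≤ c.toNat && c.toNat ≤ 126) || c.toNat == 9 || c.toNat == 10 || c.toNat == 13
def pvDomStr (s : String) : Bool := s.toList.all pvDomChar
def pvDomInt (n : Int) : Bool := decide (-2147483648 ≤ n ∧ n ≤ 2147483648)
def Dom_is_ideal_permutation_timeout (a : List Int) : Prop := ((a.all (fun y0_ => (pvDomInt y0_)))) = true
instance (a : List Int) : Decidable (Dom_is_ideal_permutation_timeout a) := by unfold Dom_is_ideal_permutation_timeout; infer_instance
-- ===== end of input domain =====

-- B replaces A's quadratic inversion-pair counting by one linear pass with a lagged running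
-- maximum (objective: faster, asymptotic).


-- ===== PORT A =====
-- len([x for x in l if x < v])  (as an Int, like Python's int arithmetic)
def pvCntLT (v : Int) (l : List Int) : Int := ((l.filter (fun x => decide (x < v))).length : Int)

-- first loop: local inversion count over a[1:] with prev chained
def pvLocal (prev : Int) : List Int → Int
  | [] => 0
  | v :: rest => (if v < prev then (1 : Int) else 0) + pvLocal v rest

-- second loop: for i, val in enumerate(a): gi += count of smaller in a[i+1:]; early False if gi > loc
def pvAGo (loc gi : Int) : List Int → Bool
  | [] => decide (gi = loc)
  | v :: rest =>
    let gi' := gi + pvCntLT v rest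
    if loc < gi' then false else pvAGo loc gi' rest

def is_ideal_permutation_timeout (a : List Int) : Bool :=
  match a with
  | [] => false   -- a[0] raises IndexError in Python; excluded by Pre_
  | p :: rest => pvAGo (pvLocal p rest) 0 (p :: rest)

-- ===== PORT B =====
-- the loop over i in range(len(a)-2): mx = max so far of a[0..i]; fail if a[i+2] < mx
def pvBGo : Option Int → List Int → Bool
  | m, x :: y :: z :: rest =>
    let m' := match m with | none => x | some v => max v x
    if z < m' then false else pvBGo (some m') (y :: z :: rest)
  | _, _ => true

def is_ideal_permutation_timeout_alt (a : List Int) : Bool := pvBGo none a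

-- ===== PRECONDITION & SPEC =====
-- Pre_ excludes only the empty list, on which A raises IndexError (a[0]).
def Pre_is_ideal_permutation_timeout (a : List Int) : Prop := 0 < a.length
instance (a : List Int) : Decidable (Pre_is_ideal_permutation_timeout a) := by unfold Pre_is_ideal_permutation_timeout; infer_instance
def pvWitness_is_ideal_permutation_timeout : List Int := [1, 0, 2]

def Spec_is_ideal_permutation_timeout (a : List Int) (out : Bool) : Prop := out = is_ideal_permutation_timeout_alt a
instance (a : List Int) (out : Bool) : Decidable (Spec_is_ideal_permutation_timeout a out) := by unfold Spec_is_ideal_permutation_timeout; infer_instance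

-- ===== CLAIM (what is proved, stated in full; the proofs are below) =====
def Claim_equal_is_ideal_permutation_timeout : Prop := ∀ (a : List Int), Dom_is_ideal_permutation_timeout a → Pre_is_ideal_permutation_timeout a → Spec_is_ideal_permutation_timeout a (is_ideal_permutation_timeout a)

-- ===== LEMMAS AND PROOFS =====

-- total inversion count, as A's second loop accumulates it
def pvGlob : List Int → Int
  | [] => 0
  | v :: rest => pvCntLT v rest + pvGlob rest

-- inversions with gap ≥ 2
def pvFar : List Int → Int
  | v :: w :: rest => pvCntLT v rest + pvFar (w :: rest)
  | _ => 0

theorem pvCntLT_nonneg (v : Int) (l : List Int) : 0 ≤ pvCntLT v l := by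
  unfold pvCntLT; positivity

theorem pvGlob_nonneg (l : List Int) : 0 ≤ pvGlob l := by
  induction l with
  | nil => simp [pvGlob]
  | cons v rest ih => have := pvCntLT_nonneg v rest; simp only [pvGlob]; omega

theorem pvFar_nonneg (l : List Int) : 0 ≤ pvFar l := by
  induction l using pvFar.induct with
  | case1 v w rest ih => have := pvCntLT_nonneg v rest; simp only [pvFar]; omega
  | case2 l h => unfold pvFar; split
                 · exact absurd rfl (h _ _ _)
                 · simp

theorem pvCntLT_cons (v x : Int) (l : List Int) :
    pvCntLT v (x :: l) = (if x < v then (1 : Int) else 0) + pvCntLT v l := by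
  unfold pvCntLT
  rw [List.filter_cons]
  by_cases h : x < v <;> simp [h] <;> push_cast <;> ring

theorem pvCntLT_eq_zero_iff (v : Int) (l : List Int) :
    pvCntLT v l = 0 ↔ ∀ x ∈ l, v ≤ x := by
  unfold pvCntLT
  rw [Int.natCast_eq_zero, List.length_eq_zero_iff, List.filter_eq_nil_iff]
  simp [not_lt]

-- A's second loop computes exactly "total inversions = local inversions"
theorem pvAGo_eq (l : List Int) : ∀ loc gi, pvAGo loc gi l = decide (gi + pvGlob l = loc) := by
  induction l with
  | nil => intro loc gi; simp [pvAGo, pvGlob]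
  | cons v rest ih =>
    intro loc gi
    have hg := pvGlob_nonneg rest
    simp only [pvAGo, pvGlob]
    split
    · next h => symm; rw [decide_eq_false_iff_not]; omega
    · next h => rw [ih]; apply decide_eq_decide.mpr; omega

-- total inversions split into adjacent and far ones
theorem pvGlob_split (p : Int) (rest : List Int) :
    pvGlob (p :: rest) = pvLocal p rest + pvFar (p :: rest) := by
  induction rest generalizing p with
  | nil => simp [pvGlob, pvLocal, pvFar, pvCntLT]
  | cons w rest' ih =>
    have h := ih w
    simp only [pvGlob, pvLocal, pvFar] at *
    rw [pvCntLT_cons]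
    split_ifs <;> omega

-- B's loop with running max m decides: nothing two or more ahead is below m, and no far inversion
theorem pvBGo_some (l : List Int) : ∀ m : Int,
    pvBGo (some m) l = decide ((∀ x ∈ l.drop 2, m ≤ x) ∧ pvFar l = 0) := by
  induction l with
  | nil => intro m; simp [pvBGo, pvFar]
  | cons x t ih =>
    intro m
    match t with
    | [] => simp [pvBGo, pvFar, pvCntLT]
    | [y] => simp [pvBGo, pvFar, pvCntLT]
    | y :: z :: rest =>
      have hcnt := pvCntLT_eq_zero_iff x (z :: rest)
      have hc := pvCntLT_nonneg x (z :: rest)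
      have hf := pvFar_nonneg (y :: z :: rest)
      have hm1 := le_max_left m x
      have hm2 := le_max_right m x
      simp only [pvBGo]
      simp only [List.drop_succ_cons, List.drop_zero,
        show pvFar (x :: y :: z :: rest) = pvCntLT x (z :: rest) + pvFar (y :: z :: rest) from rfl]
      by_cases hz : z < max m x
      · rw [if_pos hz]
        symm; rw [decide_eq_false_iff_not]
        rintro ⟨hall, hsum⟩
        have hcz : pvCntLT x (z :: rest) = 0 := by omega
        have h1 := hcnt.mp hcz z (by simp)
        have h2 := hall z (by simp)
        rcases max_choice m x with h | h <;> omega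
      · rw [if_neg hz, ih]
        push Not at hz
        apply decide_eq_decide.mpr
        simp only [List.drop_succ_cons, List.drop_zero]
        constructor
        · rintro ⟨hall, hfar⟩
          refine ⟨?_, ?_⟩
          · intro u hu
            rcases List.mem_cons.mp hu with rfl | hu
            · omega
            · have := hall u hu; omega
          · have : pvCntLT x (z :: rest) = 0 := hcnt.mpr (by
              intro u hu
              rcases List.mem_cons.mp hu with rfl | hu
              · omega
              · have := hall u hu; omega)
            omega
        · rintro ⟨hall, hsum⟩
          have hcz : pvCntLT x (z :: rest) = 0 := by omega
          have hx := hcnt.mp hcz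
          refine ⟨?_, by omega⟩
          intro u hu
          have h1 := hall u (List.mem_cons_of_mem _ hu)
          have h2 := hx u (List.mem_cons_of_mem _ hu)
          exact max_le h1 h2

theorem pvBGo_none (l : List Int) : pvBGo none l = decide (pvFar l = 0) := by
  match l with
  | [] => simp [pvBGo, pvFar]
  | [x] => simp [pvBGo, pvFar]
  | [x, y] => simp [pvBGo, pvFar, pvCntLT]
  | x :: y :: z :: rest =>
    have hcnt := pvCntLT_eq_zero_iff x (z :: rest)
    have hc := pvCntLT_nonneg x (z :: rest)
    have hf := pvFar_nonneg (y :: z :: rest)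
    simp only [pvBGo]
    simp only [show pvFar (x :: y :: z :: rest) = pvCntLT x (z :: rest) + pvFar (y :: z :: rest) from rfl]
    by_cases hz : z < x
    · rw [if_pos hz]
      symm; rw [decide_eq_false_iff_not]
      intro hsum
      have hcz : pvCntLT x (z :: rest) = 0 := by omega
      have := hcnt.mp hcz z (by simp)
      omega
    · rw [if_neg hz, pvBGo_some]
      push Not at hz
      apply decide_eq_decide.mpr
      simp only [List.drop_succ_cons, List.drop_zero]
      constructor
      · rintro ⟨hall, hfar⟩
        have : pvCntLT x (z :: rest) = 0 := hcnt.mpr (by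
          intro u hu
          rcases List.mem_cons.mp hu with rfl | hu
          · omega
          · exact hall u hu)
        omega
      · intro hsum
        have hcz : pvCntLT x (z :: rest) = 0 := by omega
        exact ⟨fun u hu => hcnt.mp hcz u (List.mem_cons_of_mem _ hu), by omega⟩

-- ===== VERDICT (by name: the statement is the Claim_ definition above) =====
theorem is_ideal_permutation_timeout_spec : Claim_equal_is_ideal_permutation_timeout := by
  intro a _ hpre
  unfold Spec_is_ideal_permutation_timeout is_ideal_permutation_timeout is_ideal_permutation_timeout_alt
  rcases a with _ | ⟨p, rest⟩
  · simp [Pre_is_ideal_permutation_timeout] at hpre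
  · show pvAGo (pvLocal p rest) 0 (p :: rest) = pvBGo none (p :: rest)
    rw [pvAGo_eq, pvBGo_none]
    apply decide_eq_decide.mpr
    rw [pvGlob_split]
    have := pvFar_nonneg (p :: rest)
    omega
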